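-- pv_equiv track=rewrite | github.com/scimone/Emails | autofill.py | find_consecutive_indices
-- ===== SOURCE A (Python) =====
-- def find_consecutive_indices(substring, string_list):
--     """
--     Finds the first index of every consecutive appearance or single appearance of a substring within a list of strings.
--     Also returns the lengths of consecutive repeating strings.
--
--     Args:
--         substring (str): The substring to search for.
--         string_list (list): List of strings.
--
--     Returns:
--         tuple: Tuple containing two lists - first indices of consecutive or single appearances, and lengths of consecutive repeating strings.
--     """
--     indices = []
--     lengths = []
--     consecutive_indices = []
--     current_length = 0
--
--     for i, string in enumerate(string_list):
--         if substring in string: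
--             if len(consecutive_indices) == 0 or consecutive_indices[-1] == i - 1:
--                 consecutive_indices.append(i)
--                 current_length += 1
--             else:
--                 if len(consecutive_indices) >= 1:
--                     indices.append(consecutive_indices[0])
--                     lengths.append(current_length)
--                 consecutive_indices = [i]
--                 current_length = 1
--
--     if len(consecutive_indices) >= 1:
--         indices.append(consecutive_indices[0])
--         lengths.append(current_length)
--
--     return indices, lengths
-- ===== SOURCE B (Python) =====
-- def find_consecutive_indices(substring, string_list):
--     hit = [substring in s for s in string_list]
--     starts = [i for i, (p, b) in enumerate(zip([False] + hit, hit)) if b and not p]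
--     ends = [i for i, (b, nx) in enumerate(zip(hit, hit[1:] + [False])) if b and not nx]
--     return starts, [e - s + 1 for s, e in zip(starts, ends)]
-- ===== Notes on version B (the rewrite author's own statement) =====
-- stated objective: alternative
-- what changed: B keeps no grouping state at all: it computes run starts (a hit whose predecessor is not a hit) and run ends (a hit whose successor is not a hit) as two independent shifted-zip comprehensions over the hit mask and zips the start/end pairs into lengths, instead of A's stateful scan that grows a consecutive_indices buffer and flushes runs.
import Mathlib
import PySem

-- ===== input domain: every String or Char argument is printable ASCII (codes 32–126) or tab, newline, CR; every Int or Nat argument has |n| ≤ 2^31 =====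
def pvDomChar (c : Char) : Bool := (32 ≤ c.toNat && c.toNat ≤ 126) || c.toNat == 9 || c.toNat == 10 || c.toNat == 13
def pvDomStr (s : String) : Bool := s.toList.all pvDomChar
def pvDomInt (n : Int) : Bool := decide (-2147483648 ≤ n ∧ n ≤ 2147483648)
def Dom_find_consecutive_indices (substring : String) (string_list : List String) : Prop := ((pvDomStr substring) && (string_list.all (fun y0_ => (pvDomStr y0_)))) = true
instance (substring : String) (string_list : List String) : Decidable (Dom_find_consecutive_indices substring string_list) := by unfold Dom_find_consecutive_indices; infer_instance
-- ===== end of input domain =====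

-- B replaces A's stateful run-grouping scan by boundary detection: it marks run starts
-- (hit with no hit before) and run ends (hit with no hit after) independently and zips
-- them into lengths. Objective: alternative (no grouping state at all).

-- ===== PORT A =====
-- loop body of A (state: indices, lengths, consecutive_indices, current_length); runs on a match at index i
def pvStepA (s : List Int × List Int × List Int × Int) (i : Int) : List Int × List Int × List Int × Int :=
  let (indices, lengths, consec, cur) := s
  if consec.length == 0 || PySem.List.pyGet? consec (-1) == some (i - 1) then
    (indices, lengths, consec ++ [i], cur + 1)
  else
    -- len(consecutive_indices) >= 1 holds here; consec[0] is its head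
    (indices ++ [consec.headD 0], lengths ++ [cur], [i], 1)

def find_consecutive_indices (substring : String) (string_list : List String) : List Int × List Int :=
  let st := (PySem.List.enumerate string_list).foldl
    (fun s p => if PySem.Str.isIn substring p.2 then pvStepA s p.1 else s)
    ([], [], [], 0)
  let (indices, lengths, consec, cur) := st
  if consec.length ≥ 1 then (indices ++ [consec.headD 0], lengths ++ [cur]) else (indices, lengths)

-- ===== PORT B =====
def find_consecutive_indices_alt (substring : String) (string_list : List String) : List Int × List Int :=
  let hit := string_list.map (fun s => PySem.Str.isIn substring s)
  let starts := ((PySem.List.enumerate ((false :: hit).zip hit)).filter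
      (fun p => p.2.2 && !p.2.1)).map (·.1)
  let ends := ((PySem.List.enumerate (hit.zip (PySem.List.slice hit (some 1) none ++ [false]))).filter
      (fun p => p.2.1 && !p.2.2)).map (·.1)
  (starts, (starts.zip ends).map (fun p => p.2 - p.1 + 1))

-- ===== PRECONDITION & SPEC =====
def Spec_find_consecutive_indices (substring : String) (string_list : List String) (out : List Int × List Int) : Prop := out = find_consecutive_indices_alt substring string_list
instance (substring : String) (string_list : List String) (out : List Int × List Int) : Decidable (Spec_find_consecutive_indices substring string_list out) := by unfold Spec_find_consecutive_indices; infer_instance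

-- ===== CLAIM (what is proved, stated in full; the proofs are below) =====
def Claim_equal_find_consecutive_indices : Prop := ∀ (substring : String) (string_list : List String), Dom_find_consecutive_indices substring string_list → Spec_find_consecutive_indices substring string_list (find_consecutive_indices substring string_list)

-- ===== LEMMAS AND PROOFS =====

-- number of leading `true`s of a hit list
def pvLead : List Bool → Nat
  | true :: t => pvLead t + 1
  | _ => 0

-- run starts from position i, given whether position i-1 was a hit
def pvS : Int → Bool → List Bool → List Int
  | _, _, [] => []
  | i, prev, b :: t => (if b && !prev then [i] else []) ++ pvS (i + 1) b t

-- run ends from position i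
def pvE : Int → List Bool → List Int
  | _, [] => []
  | i, b :: t => (if b && !(t.head?.getD false) then [i] else []) ++ pvE (i + 1) t

-- canonical runs (first index, length) of a hit list starting at position i
def pvG : Int → List Bool → List Int × List Int
  | _, [] => ([], [])
  | i, false :: t => pvG (i + 1) t
  | i, true :: t =>
      let k := pvLead t
      let r := pvG (i + 1 + (k : Int)) (t.drop k)
      (i :: r.1, (1 + (k : Int)) :: r.2)
termination_by _ t => t.length
decreasing_by
  all_goals simp [List.length_drop]

-- A's loop specialised to the hit list (same state, same steps)
def pvFoldA (i : Int) (st : List Int × List Int × List Int × Int) :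
    List Bool → List Int × List Int × List Int × Int
  | [] => st
  | b :: t => pvFoldA (i + 1) (if b then pvStepA st i else st) t

-- A's end-of-loop flush
def pvFinishA (st : List Int × List Int × List Int × Int) : List Int × List Int :=
  if st.2.2.1.length ≥ 1 then (st.1 ++ [st.2.2.1.headD 0], st.2.1 ++ [st.2.2.2])
  else (st.1, st.2.1)

lemma pvFoldA_eq (sub : String) :
    ∀ (l : List String) (i : Int) (st : List Int × List Int × List Int × Int),
      (PySem.List.enumerate l i).foldl
        (fun s p => if PySem.Str.isIn sub p.2 then pvStepA s p.1 else s) st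
      = pvFoldA i st (l.map (fun s => PySem.Str.isIn sub s)) := by
  intro l
  induction l with
  | nil => intro i st; rfl
  | cons x t ih =>
    intro i st
    simp only [PySem.List.enumerate_cons, List.foldl_cons, List.map_cons, pvFoldA]
    exact ih (i + 1) _

lemma pvA_eq_finish (sub : String) (l : List String) :
    find_consecutive_indices sub l
      = pvFinishA (pvFoldA 0 ([], [], [], 0) (l.map (fun s => PySem.Str.isIn sub s))) := by
  unfold find_consecutive_indices
  rw [pvFoldA_eq]
  obtain ⟨ia, la, c, cur⟩ := pvFoldA 0 ([], [], [], 0) (l.map (fun s => PySem.Str.isIn sub s))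
  simp [pvFinishA]

lemma pvG_nil (i : Int) : pvG i [] = ([], []) := by rw [pvG.eq_def]

-- after prev = true, starts skip the current run's leading trues
lemma pvS_true_block (t : List Bool) : ∀ i : Int,
    pvS i true t = pvS (i + (pvLead t : Int)) false (t.drop (pvLead t)) := by
  induction t with
  | nil => intro i; rfl
  | cons b u ih =>
    intro i
    cases b with
    | false => simp [pvS, pvLead]
    | true =>
      show pvS i true (true :: u)
          = pvS (i + ((pvLead u + 1 : Nat) : Int)) false ((true :: u).drop (pvLead u + 1))
      rw [List.drop_succ_cons]
      have h1 : pvS i true (true :: u) = pvS (i + 1) true u := by simp [pvS]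
      rw [h1, ih (i + 1)]
      congr 1
      push_cast
      ring

-- a maximal run of trues ends exactly after its leading trues
lemma pvE_block (t : List Bool) : ∀ i : Int,
    pvE i (true :: t)
      = (i + (pvLead t : Int)) :: pvE (i + 1 + (pvLead t : Int)) (t.drop (pvLead t)) := by
  induction t with
  | nil => intro i; simp [pvE, pvLead]
  | cons b u ih =>
    intro i
    cases b with
    | false => simp [pvE, pvLead]
    | true =>
      show pvE i (true :: true :: u)
          = (i + ((pvLead u + 1 : Nat) : Int))
            :: pvE (i + 1 + ((pvLead u + 1 : Nat) : Int)) ((true :: u).drop (pvLead u + 1))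
      rw [List.drop_succ_cons]
      have h1 : pvE i (true :: true :: u) = pvE (i + 1) (true :: u) := by
        rw [show pvE i (true :: true :: u)
            = (if (true && !((true :: u).head?.getD false)) = true then [i] else [])
              ++ pvE (i + 1) (true :: u) from rfl]
        simp
      rw [h1, ih (i + 1)]
      congr 1
      · push_cast; ring
      · congr 1; push_cast; ring

lemma pvG_true (i : Int) (u : List Bool) :
    pvG i (true :: u)
      = (i :: (pvG (i + 1 + (pvLead u : Int)) (u.drop (pvLead u))).1,
         (1 + (pvLead u : Int)) :: (pvG (i + 1 + (pvLead u : Int)) (u.drop (pvLead u))).2) := by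
  rw [pvG.eq_def]

lemma pvG_false (i : Int) (u : List Bool) : pvG i (false :: u) = pvG (i + 1) u := by
  rw [pvG.eq_def]

lemma pvSEzip (n : Nat) : ∀ (t : List Bool), t.length ≤ n → ∀ i : Int,
    pvS i false t = (pvG i t).1 ∧
    ((pvS i false t).zip (pvE i t)).map (fun p => p.2 - p.1 + 1) = (pvG i t).2 := by
  induction n with
  | zero =>
    intro t ht i
    have : t = [] := List.eq_nil_of_length_eq_zero (Nat.le_zero.mp ht)
    subst this
    simp [pvS, pvE, pvG_nil]
  | succ n ih =>
    intro t ht i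
    cases t with
    | nil => simp [pvS, pvE, pvG_nil]
    | cons b u =>
      have hul : u.length ≤ n := by simp at ht; omega
      cases b with
      | false =>
        have h := ih u hul (i + 1)
        simp only [pvS, pvE, pvG_false]
        simpa using h
      | true =>
        have hdl : (u.drop (pvLead u)).length ≤ n := by
          have := List.length_drop (l := u) (i := pvLead u)
          omega
        have h := ih (u.drop (pvLead u)) hdl (i + 1 + (pvLead u : Int))
        have hS : pvS i false (true :: u)
            = i :: pvS (i + 1 + (pvLead u : Int)) false (u.drop (pvLead u)) := by
          rw [show pvS i false (true :: u) = i :: pvS (i + 1) true u from by simp [pvS]]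
          rw [pvS_true_block u (i + 1)]
        constructor
        · rw [hS, pvG_true, h.1]
        · rw [hS, pvE_block u i, pvG_true]
          simp only [List.zip_cons_cons, List.map_cons, h.2]
          congr 1
          ring
  
-- the B-port comprehensions compute pvS and pvE
lemma pvStartsOf (t : List Bool) : ∀ (prev : Bool) (i : Int),
    (((PySem.List.enumerate ((prev :: t).zip t) i).filter
        (fun p => p.2.2 && !p.2.1)).map (·.1)) = pvS i prev t := by
  induction t with
  | nil => intro prev i; rfl
  | cons b u ih =>
    intro prev i
    simp only [List.zip_cons_cons, PySem.List.enumerate_cons, List.filter_cons]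
    cases hb : (b && !prev) <;>
      simp [pvS, hb, ih b (i + 1)]

lemma pvEndsOf (t : List Bool) : ∀ i : Int,
    (((PySem.List.enumerate (t.zip (t.tail ++ [false])) i).filter
        (fun p => p.2.1 && !p.2.2)).map (·.1)) = pvE i t := by
  induction t with
  | nil => intro i; rfl
  | cons b u ih =>
    intro i
    have hz : (b :: u).zip ((b :: u).tail ++ [false])
        = (b, u.head?.getD false) :: u.zip (u.tail ++ [false]) := by
      cases u <;> simp
    rw [hz]
    simp only [PySem.List.enumerate_cons, List.filter_cons]
    cases hb : (b && !(u.head?.getD false)) <;>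
      simp [pvE, hb, ih (i + 1)]

-- single steps of A's loop from each reachable state shape
lemma pvStepA_cont (ia la : List Int) (f : Int) (rest : List Int) (cur i : Int)
    (h : (f :: rest).getLast? = some (i - 1)) :
    pvStepA (ia, la, f :: rest, cur) i = (ia, la, f :: (rest ++ [i]), cur + 1) := by
  simp [pvStepA, PySem.List.pyGet?_neg_one, h]

lemma pvStepA_flush (ia la : List Int) (f : Int) (rest : List Int) (cur i L : Int)
    (h : (f :: rest).getLast? = some L) (hL : L ≤ i - 2) :
    pvStepA (ia, la, f :: rest, cur) i = (ia ++ [f], la ++ [cur], [i], 1) := by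
  have hne : L ≠ i - 1 := by omega
  simp [pvStepA, PySem.List.pyGet?_neg_one, h, hne]

lemma pvStepA_empty (ia la : List Int) (cur i : Int) :
    pvStepA (ia, la, ([] : List Int), cur) i = (ia, la, [i], cur + 1) := by
  simp [pvStepA]

-- the core simulation: A's loop + flush from each reachable state equals the canonical runs
lemma pvCore : ∀ t : List Bool,
    (∀ (i : Int) (ia la : List Int) (f : Int) (rest : List Int) (cur : Int),
      (f :: rest).getLast? = some (i - 1) →
      pvFinishA (pvFoldA i (ia, la, f :: rest, cur) t)
        = (ia ++ f :: (pvG (i + (pvLead t : Int)) (t.drop (pvLead t))).1,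
           la ++ (cur + (pvLead t : Int)) :: (pvG (i + (pvLead t : Int)) (t.drop (pvLead t))).2)) ∧
    (∀ (i : Int) (ia la : List Int) (f : Int) (rest : List Int) (cur L : Int),
      (f :: rest).getLast? = some L → L ≤ i - 2 →
      pvFinishA (pvFoldA i (ia, la, f :: rest, cur) t)
        = (ia ++ f :: (pvG i t).1, la ++ cur :: (pvG i t).2)) ∧
    (∀ (i : Int) (ia la : List Int),
      pvFinishA (pvFoldA i (ia, la, ([] : List Int), (0 : Int)) t)
        = (ia ++ (pvG i t).1, la ++ (pvG i t).2)) := by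
  intro t
  induction t with
  | nil =>
    refine ⟨?_, ?_, ?_⟩
    · intro i ia la f rest cur _
      simp [pvFoldA, pvFinishA, pvG_nil, pvLead]
    · intro i ia la f rest cur L _ _
      simp [pvFoldA, pvFinishA, pvG_nil]
    · intro i ia la
      simp [pvFoldA, pvFinishA, pvG_nil]
  | cons b u ih =>
    obtain ⟨ihP, ihQ, ihR⟩ := ih
    refine ⟨?_, ?_, ?_⟩
    · intro i ia la f rest cur hlast
      cases b with
      | true =>
        rw [show pvFoldA i (ia, la, f :: rest, cur) (true :: u)
            = pvFoldA (i + 1) (pvStepA (ia, la, f :: rest, cur) i) u from rfl]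
        rw [pvStepA_cont ia la f rest cur i hlast]
        have hlast2 : (f :: (rest ++ [i])).getLast? = some ((i + 1) - 1) := by
          rw [← List.cons_append, List.getLast?_concat]
          congr 1
          ring
        rw [ihP (i + 1) ia la f (rest ++ [i]) (cur + 1) hlast2]
        show _ = (ia ++ f :: (pvG (i + ((pvLead u + 1 : Nat) : Int)) ((true :: u).drop (pvLead u + 1))).1,
                  la ++ (cur + ((pvLead u + 1 : Nat) : Int)) :: (pvG (i + ((pvLead u + 1 : Nat) : Int)) ((true :: u).drop (pvLead u + 1))).2)
        rw [List.drop_succ_cons]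
        have harith : i + 1 + (pvLead u : Int) = i + ((pvLead u + 1 : Nat) : Int) := by
          push_cast; ring
        have harith2 : cur + 1 + (pvLead u : Int) = cur + ((pvLead u + 1 : Nat) : Int) := by
          push_cast; ring
        rw [harith, harith2]
      | false =>
        rw [show pvFoldA i (ia, la, f :: rest, cur) (false :: u)
            = pvFoldA (i + 1) (ia, la, f :: rest, cur) u from rfl]
        rw [ihQ (i + 1) ia la f rest cur (i - 1) hlast (by omega)]
        show _ = (ia ++ f :: (pvG (i + ((0 : Nat) : Int)) ((false :: u).drop 0)).1,
                  la ++ (cur + ((0 : Nat) : Int)) :: (pvG (i + ((0 : Nat) : Int)) ((false :: u).drop 0)).2)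
        rw [List.drop_zero, pvG_false]
        norm_num
    · intro i ia la f rest cur L hlast hL
      cases b with
      | true =>
        rw [show pvFoldA i (ia, la, f :: rest, cur) (true :: u)
            = pvFoldA (i + 1) (pvStepA (ia, la, f :: rest, cur) i) u from rfl]
        rw [pvStepA_flush ia la f rest cur i L hlast hL]
        have hlast2 : ([i] : List Int).getLast? = some ((i + 1) - 1) := by
          simp
        rw [ihP (i + 1) (ia ++ [f]) (la ++ [cur]) i [] 1 hlast2]
        rw [pvG_true]
        simp [List.append_assoc]
      | false =>
        rw [show pvFoldA i (ia, la, f :: rest, cur) (false :: u)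
            = pvFoldA (i + 1) (ia, la, f :: rest, cur) u from rfl]
        rw [ihQ (i + 1) ia la f rest cur L hlast (by omega), pvG_false]
    · intro i ia la
      cases b with
      | true =>
        rw [show pvFoldA i (ia, la, ([] : List Int), (0 : Int)) (true :: u)
            = pvFoldA (i + 1) (pvStepA (ia, la, [], 0) i) u from rfl]
        rw [pvStepA_empty]
        have hlast2 : ([i] : List Int).getLast? = some ((i + 1) - 1) := by
          simp
        rw [ihP (i + 1) ia la i [] (0 + 1) hlast2]
        rw [pvG_true]
        norm_num
      | false =>
        rw [show pvFoldA i (ia, la, ([] : List Int), (0 : Int)) (false :: u)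
            = pvFoldA (i + 1) (ia, la, [], 0) u from rfl]
        rw [ihR (i + 1) ia la, pvG_false]

-- ===== VERDICT (by name: the statement is the Claim_ definition above) =====
theorem find_consecutive_indices_spec : Claim_equal_find_consecutive_indices := by
  intro sub l _
  unfold Spec_find_consecutive_indices find_consecutive_indices_alt
  rw [pvA_eq_finish]
  rw [(pvCore (l.map (fun s => PySem.Str.isIn sub s))).2.2 0 [] []]
  simp only [PySem.List.slice_from_one, pvStartsOf, pvEndsOf]
  obtain ⟨h1, h2⟩ := pvSEzip (l.map (fun s => PySem.Str.isIn sub s)).length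
    (l.map (fun s => PySem.Str.isIn sub s)) le_rfl 0
  simp only [List.nil_append]
  rw [h2, h1]
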